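-- pv_equiv track=rewrite | github.com/dasnil500/work_3 | analysis/transitive_relations.py | find_chains_with_filter
-- ===== SOURCE A (Python) =====
-- def normalize_segment(segment):
--     if segment is None:
--         return ""
--     return segment.strip().lower()
--
-- def find_chains_with_filter(relations):
--     chains = []
--     single_relations = []
--     relation_dict = {}
--
--     # for tail, relation_type, head in relations:
--     #     tail = normalize_segment(tail)
--     #     head = normalize_segment(head)
--     #     if tail not in relation_dict:
--     #         relation_dict[tail] = []
--     #     relation_dict[tail].append((head, relation_type))
--
--     for tail, head in relations:
--         tail = normalize_segment(tail)
--         head = normalize_segment(head)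
--         if tail not in relation_dict:
--             relation_dict[tail] = []
--         relation_dict[tail].append((head))
--
--     for node in relation_dict:
--         stack = [(node, [node])]
--         while stack:
--             current_node, current_chain = stack.pop()
--             if current_node not in relation_dict:
--                 if len(current_chain) == 2:  # Track single relations (2 nodes, 1 relation)
--                     single_relations.append(current_chain)
--                 elif len(current_chain) > 2:  # Track chains with more than 1 relation
--                     chains.append(current_chain)
--                 continue
--             for neighbor in relation_dict[current_node]:
--                 if neighbor in current_chain:
--                     continue
--                 stack.append((neighbor, current_chain + [neighbor]))
--             if len(current_chain) > 2:  # Ensure only chains with >1 relation are kept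
--                 chains.append(current_chain)
--             elif len(current_chain) == 2:  # Keep track of single relations
--                 single_relations.append(current_chain)
--
--     chains.sort(key=len, reverse=True)
--     filtered_chains = []
--     for chain in chains:
--         is_subchain = any(
--             set(chain).issubset(set(other_chain)) and chain != other_chain
--             for other_chain in chains
--         )
--         if not is_subchain and len(chain) > 2:  # Only keep chains with >2 nodes
--             filtered_chains.append(chain)
--
--     return filtered_chains, single_relations
-- ===== SOURCE B (Python) =====
-- def normalize_segment(segment):
--     if segment is None:
--         return ""
--     return segment.strip().lower()
--
-- def find_chains_with_filter(relations):
--     adj = {}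
--     for tail, head in relations:
--         adj.setdefault(normalize_segment(tail), []).append(normalize_segment(head))
--
--     chains = []
--     single_relations = []
--
--     def dfs(node, path):
--         if len(path) > 2:
--             chains.append(path)
--         elif len(path) == 2:
--             single_relations.append(path)
--         for neighbor in reversed(adj.get(node, [])):
--             if neighbor not in path:
--                 dfs(neighbor, path + [neighbor])
--
--     for node in adj:
--         dfs(node, [node])
--
--     chains.sort(key=len, reverse=True)
--     filtered_chains = [
--         chain for chain in chains
--         if len(chain) > 2 and not any(
--             all(x in other for x in chain) and chain != other
--             for other in chains
--         )
--     ]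
--     return filtered_chains, single_relations
-- ===== Notes on version B (the rewrite author's own statement) =====
-- stated objective: simpler
-- what changed: The explicit stack of (node, whole-chain-copy) pairs is replaced by a recursive DFS helper that classifies the current path on entry and recurses over the neighbors, and the set()-based subset filter is replaced by a direct all-membership comprehension.
import Mathlib
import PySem

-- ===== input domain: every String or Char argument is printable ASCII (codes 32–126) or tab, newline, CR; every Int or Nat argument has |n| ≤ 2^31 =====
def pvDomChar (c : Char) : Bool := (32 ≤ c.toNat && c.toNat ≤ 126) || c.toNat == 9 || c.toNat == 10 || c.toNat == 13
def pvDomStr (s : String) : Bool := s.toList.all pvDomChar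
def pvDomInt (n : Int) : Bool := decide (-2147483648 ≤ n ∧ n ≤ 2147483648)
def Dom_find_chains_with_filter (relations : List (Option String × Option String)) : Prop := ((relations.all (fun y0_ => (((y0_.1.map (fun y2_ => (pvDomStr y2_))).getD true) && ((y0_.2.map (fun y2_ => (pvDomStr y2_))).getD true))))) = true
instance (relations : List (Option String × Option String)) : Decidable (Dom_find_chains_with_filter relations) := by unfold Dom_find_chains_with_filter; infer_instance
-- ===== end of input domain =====

-- B replaces A's explicit stack of (node, chain) pairs by a recursive DFS helper and the
-- set()-based subset test by a direct all-membership test; objective: simpler (same output).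

-- ===== PORT A =====

-- normalize_segment (shared by both Pythons)
def pvNorm (s? : Option String) : String :=
  match s? with
  | none => ""
  | some s => PySem.Str.lower (PySem.Str.strip s)

-- all head strings stored in the adjacency dict (used only for fuel / termination measures)
def pvAllVals (adj : PySem.Dict String (List String)) : List String := adj.values.flatten

-- number of dict values not yet on the path (termination measure for the DFS)
def pvMu (adj : PySem.Dict String (List String)) (path : List String) : Nat :=
  ((pvAllVals adj).filter (fun x => !path.contains x)).length

-- weight of a DFS stack: an upper bound on the number of loop iterations A still performs
def pvW (adj : PySem.Dict String (List String)) (stack : List (String × List String)) : Nat :=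
  (stack.map (fun e => ((pvAllVals adj).length + 2) ^ (pvMu adj e.2 + 1))).sum

-- the `while stack:` loop of A; fuel only makes the recursion structural (pvW is always enough).
-- Python's stack pushes/pops at the END of the list; here the head of the list is the top,
-- so pushing the neighbours in order = consing them reversed.
def pvLoopA (adj : PySem.Dict String (List String)) :
    Nat → List (String × List String) → List (List String) → List (List String) →
    List (List String) × List (List String)
  | _, [], chains, singles => (chains, singles)
  | 0, _ :: _, chains, singles => (chains, singles)   -- unreachable with the fuel pvW supplies
  | fuel + 1, (node, chain) :: rest, chains, singles =>
    match adj.get? node with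
    | none =>
      if chain.length == 2 then pvLoopA adj fuel rest chains (singles ++ [chain])
      else if 2 < chain.length then pvLoopA adj fuel rest (chains ++ [chain]) singles
      else pvLoopA adj fuel rest chains singles
    | some nbrs =>
      let stack' := ((nbrs.filter (fun n => !chain.contains n)).map
                      (fun n => (n, chain ++ [n]))).reverse ++ rest
      if 2 < chain.length then pvLoopA adj fuel stack' (chains ++ [chain]) singles
      else if chain.length == 2 then pvLoopA adj fuel stack' chains (singles ++ [chain])
      else pvLoopA adj fuel stack' chains singles

def find_chains_with_filter (relations : List (Option String × Option String)) :
    List (List String) × List (List String) :=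
  let adj := relations.foldl (fun d p =>
      let t := pvNorm p.1
      let h := pvNorm p.2
      let d' := if d.contains t then d else d.insert t []
      d'.modify t [] (fun l => l ++ [h])) PySem.Dict.empty
  let cs := adj.keys.foldl
      (fun acc k => pvLoopA adj (pvW adj [(k, [k])]) [(k, [k])] acc.1 acc.2) ([], [])
  let chains := PySem.List.sorted cs.1 (fun c => (c.length : Int)) true
  let filtered := chains.foldl (fun acc chain =>
      let is_sub := chains.any (fun other =>
        PySem.Set.issubset (PySem.Set.ofList chain) (PySem.Set.ofList other) && chain != other)
      if !is_sub && decide (2 < chain.length) then acc ++ [chain] else acc) []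
  (filtered, cs.2)

-- ===== PORT B =====

-- termination helpers for the recursive dfs of B
theorem pvGet?_mem_values (adj : PySem.Dict String (List String)) {node : String}
    {l : List String} (h : adj.get? node = some l) : l ∈ adj.values := by
  have h2 := PySem.Dict.mem_items_of_get?_eq_some (d := adj) h
  simp only [PySem.Dict.values, List.mem_map]
  exact ⟨(node, l), h2, rfl⟩

theorem pvMem_allVals (adj : PySem.Dict String (List String)) (node : String) {x : String}
    (hx : x ∈ (adj.getD node []).reverse) : x ∈ pvAllVals adj := by
  rw [List.mem_reverse] at hx
  rcases h : adj.get? node with _ | l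
  · rw [PySem.Dict.getD_eq_get?_getD, h] at hx; simp at hx
  · rw [PySem.Dict.getD_eq_get?_getD, h] at hx
    exact List.mem_flatten.mpr ⟨l, pvGet?_mem_values adj h, hx⟩

theorem pvFilter_le {α : Type} (l : List α) (p q : α → Bool)
    (himp : ∀ x, q x = true → p x = true) :
    (l.filter q).length ≤ (l.filter p).length := by
  have h : l.filter q = (l.filter p).filter q := by
    rw [List.filter_filter]
    exact (List.filter_congr (fun x _ => by cases hq : q x <;> simp [hq, himp x])).symm
  rw [h]
  exact List.length_filter_le _ _

theorem pvFilter_lt {α : Type} (l : List α) (p q : α → Bool)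
    (himp : ∀ x, q x = true → p x = true) {a : α} (ha : a ∈ l)
    (hpa : p a = true) (hqa : q a = false) :
    (l.filter q).length < (l.filter p).length := by
  induction l with
  | nil => cases ha
  | cons b t ih =>
    rcases List.mem_cons.mp ha with rfl | hat
    · have hle := pvFilter_le t p q himp
      simp [hpa, hqa]
      omega
    · by_cases hqb : q b = true
      · have hpb := himp b hqb
        simpa [List.filter_cons, hqb, hpb] using ih hat
      · have h1 := ih hat
        by_cases hpb : p b = true <;>
          simp [hqb, hpb] <;> omega

theorem pvMu_lt (adj : PySem.Dict String (List String)) {path : List String} {n : String}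
    (hn : n ∈ pvAllVals adj) (hnp : ¬ path.contains n = true) :
    pvMu adj (path ++ [n]) < pvMu adj path := by
  apply pvFilter_lt (pvAllVals adj) _ _ _ hn
  · simpa using hnp
  · simp
  · intro x hx
    simp only [Bool.not_eq_eq_eq_not, Bool.not_true, List.contains_eq_mem,
      List.mem_append, decide_eq_false_iff_not] at hx
    simp only [Bool.not_eq_eq_eq_not, Bool.not_true, List.contains_eq_mem,
      decide_eq_false_iff_not]
    exact fun hm => hx (Or.inl hm)

-- the recursive dfs helper of B (structure of Source B; attach only carries the termination proof)
def pvDfs (adj : PySem.Dict String (List String)) (node : String) (path : List String) :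
    List (List String) × List (List String) :=
  let base : List (List String) × List (List String) :=
    if 2 < path.length then ([path], [])
    else if path.length == 2 then ([], [path])
    else ([], [])
  (adj.getD node []).reverse.attach.foldl
    (fun acc x =>
      if h : path.contains x.1 then acc
      else
        let r := pvDfs adj x.1 (path ++ [x.1])
        (acc.1 ++ r.1, acc.2 ++ r.2))
    base
termination_by pvMu adj path
decreasing_by exact pvMu_lt adj (pvMem_allVals adj node x.2) h

def find_chains_with_filter_alt (relations : List (Option String × Option String)) :
    List (List String) × List (List String) :=
  let adj := relations.foldl (fun d p =>
      let t := pvNorm p.1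
      let h := pvNorm p.2
      (d.setdefault t []).modify t [] (fun l => l ++ [h])) PySem.Dict.empty
  let cs := adj.keys.foldl
      (fun acc k =>
        let r := pvDfs adj k [k]
        (acc.1 ++ r.1, acc.2 ++ r.2)) ([], [])
  let chains := PySem.List.sorted cs.1 (fun c => (c.length : Int)) true
  let filtered := chains.filter (fun chain =>
      decide (2 < chain.length) &&
      !(chains.any (fun other => chain.all (fun x => other.contains x) && chain != other)))
  (filtered, cs.2)

-- ===== PRECONDITION & SPEC =====
def Spec_find_chains_with_filter (relations : List (Option String × Option String)) (out : List (List String) × List (List String)) : Prop := out = find_chains_with_filter_alt relations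
instance (relations : List (Option String × Option String)) (out : List (List String) × List (List String)) : Decidable (Spec_find_chains_with_filter relations out) := by unfold Spec_find_chains_with_filter; infer_instance

-- ===== CLAIM (what is proved, stated in full; the proofs are below) =====
def Claim_equal_find_chains_with_filter : Prop := ∀ (relations : List (Option String × Option String)), Dom_find_chains_with_filter relations → Spec_find_chains_with_filter relations (find_chains_with_filter relations)

-- ===== LEMMAS AND PROOFS =====

-- the list of (chains, singles) produced by running B's dfs on each stack entry in order
def pvProc (adj : PySem.Dict String (List String)) :
    List (String × List String) → List (List String) × List (List String)
  | [] => ([], [])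
  | (n, c) :: rest =>
    let r := pvDfs adj n c
    let r' := pvProc adj rest
    (r.1 ++ r'.1, r.2 ++ r'.2)

theorem pvProc_append (adj : PySem.Dict String (List String))
    (a b : List (String × List String)) :
    pvProc adj (a ++ b) =
      ((pvProc adj a).1 ++ (pvProc adj b).1, (pvProc adj a).2 ++ (pvProc adj b).2) := by
  induction a with
  | nil => simp [pvProc]
  | cons e t ih => cases e; simp [pvProc, ih]

-- the neighbour loop of B's dfs, folded over a plain list
theorem pvDfsFold (adj : PySem.Dict String (List String)) (path : List String) :
    ∀ (l : List String) (acc : List (List String) × List (List String)),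
      l.foldl (fun acc n =>
          if path.contains n then acc
          else
            (acc.1 ++ (pvDfs adj n (path ++ [n])).1, acc.2 ++ (pvDfs adj n (path ++ [n])).2))
        acc
      = (acc.1 ++ (pvProc adj ((l.filter (fun n => !path.contains n)).map
            (fun n => (n, path ++ [n])))).1,
         acc.2 ++ (pvProc adj ((l.filter (fun n => !path.contains n)).map
            (fun n => (n, path ++ [n])))).2) := by
  intro l
  induction l with
  | nil => intro acc; simp [pvProc]
  | cons a t ih =>
    intro acc
    by_cases ha : a ∈ path
    · simpa [List.foldl_cons, ha, List.filter_cons] using ih acc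
    · have h2 := ih (acc.1 ++ (pvDfs adj a (path ++ [a])).1, acc.2 ++ (pvDfs adj a (path ++ [a])).2)
      simpa [List.foldl_cons, ha, List.filter_cons, pvProc, List.append_assoc] using h2

-- B's dfs unfolded as: classify the path, then process the pushed entries
theorem pvDfs_eq (adj : PySem.Dict String (List String)) (node : String) (path : List String) :
    pvDfs adj node path =
      (let base : List (List String) × List (List String) :=
        if 2 < path.length then ([path], [])
        else if path.length == 2 then ([], [path])
        else ([], [])
      let r := pvProc adj (((adj.getD node []).reverse.filter (fun n => !path.contains n)).map
                 (fun n => (n, path ++ [n])))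
      (base.1 ++ r.1, base.2 ++ r.2)) := by
  rw [pvDfs]
  simp only [dite_eq_ite]
  rw [List.foldl_attach
        (l := (adj.getD node []).reverse)
        (f := fun acc n => if path.contains n = true then acc
            else (acc.1 ++ (pvDfs adj n (path ++ [n])).1, acc.2 ++ (pvDfs adj n (path ++ [n])).2))
        (b := if 2 < path.length then ([path], ([] : List (List String)))
            else if (path.length == 2) = true then ([], [path]) else ([], [])),
      pvDfsFold adj path]

-- main simulation lemma: the fueled stack loop of A computes pvProc of the stack
theorem pvLoopA_eq (adj : PySem.Dict String (List String)) :
    ∀ (fuel : Nat) (stack : List (String × List String))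
      (chains singles : List (List String)),
      pvW adj stack ≤ fuel →
      pvLoopA adj fuel stack chains singles =
        (chains ++ (pvProc adj stack).1, singles ++ (pvProc adj stack).2) := by
  intro fuel
  induction fuel with
  | zero =>
    intro stack chains singles hW
    cases stack with
    | nil => simp [pvLoopA, pvProc]
    | cons e rest =>
      exfalso
      have h1 : 1 ≤ ((pvAllVals adj).length + 2) ^ (pvMu adj e.2 + 1) :=
        Nat.one_le_pow _ _ (by omega)
      have h2 : 1 ≤ pvW adj (e :: rest) := by
        simp only [pvW, List.map_cons, List.sum_cons]; omega
      omega
  | succ f ih =>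
    intro stack chains singles hW
    cases stack with
    | nil => simp [pvLoopA, pvProc]
    | cons e rest =>
      obtain ⟨node, chain⟩ := e
      have hP1 : 1 ≤ ((pvAllVals adj).length + 2) ^ (pvMu adj chain) :=
        Nat.one_le_pow _ _ (by omega)
      have hWc : pvW adj ((node, chain) :: rest) =
          ((pvAllVals adj).length + 2) ^ (pvMu adj chain + 1) + pvW adj rest := by
        simp [pvW]
      rcases hget : adj.get? node with _ | nbrs
      · -- node not a key: classify the chain and continue with the rest of the stack
        have hrest : pvW adj rest ≤ f := by
          have h1 : 1 ≤ ((pvAllVals adj).length + 2) ^ (pvMu adj chain + 1) :=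
            Nat.one_le_pow _ _ (by omega)
          omega
        have hdfs : pvDfs adj node chain =
            (if 2 < chain.length then ([chain], [])
             else if chain.length == 2 then ([], [chain]) else ([], [])) := by
          rw [pvDfs_eq]
          simp [PySem.Dict.getD_eq_get?_getD, hget, pvProc]
        by_cases h2 : chain.length = 2
        · simp [pvLoopA, hget, h2, ih rest _ _ hrest, pvProc, hdfs]
        · by_cases h3 : 2 < chain.length
          · simp [pvLoopA, hget, h2, h3, ih rest _ _ hrest, pvProc, hdfs]
          · simp [pvLoopA, hget, h2, h3, ih rest _ _ hrest, pvProc, hdfs]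
      · -- node is a key: push the unseen neighbours, classify the chain
        have hgetD : adj.getD node [] = nbrs := by
          rw [PySem.Dict.getD_eq_get?_getD, hget]; rfl
        have hsub : ∀ n ∈ nbrs, n ∈ pvAllVals adj := fun n hn =>
          List.mem_flatten.mpr ⟨nbrs, pvGet?_mem_values adj hget, hn⟩
        have hlen : nbrs.length ≤ (pvAllVals adj).length :=
          (List.sublist_flatten_of_mem (pvGet?_mem_values adj hget)).length_le
        have hWpush : pvW adj (((nbrs.filter (fun n => !chain.contains n)).map
              (fun n => (n, chain ++ [n]))).reverse)
            ≤ (pvAllVals adj).length * ((pvAllVals adj).length + 2) ^ (pvMu adj chain) := by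
          have hbound : ∀ x ∈ (((nbrs.filter (fun n => !chain.contains n)).map
                (fun n => (n, chain ++ [n]))).reverse).map
                  (fun e => ((pvAllVals adj).length + 2) ^ (pvMu adj e.2 + 1)),
              x ≤ ((pvAllVals adj).length + 2) ^ (pvMu adj chain) := by
            intro x hx
            simp only [List.mem_map, List.mem_reverse, List.mem_filter] at hx
            obtain ⟨e, ⟨n, ⟨hn, hnc⟩, rfl⟩, rfl⟩ := hx
            have hmu : pvMu adj (chain ++ [n]) + 1 ≤ pvMu adj chain := by
              have hncc : ¬ chain.contains n = true := by simpa using hnc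
              have := pvMu_lt adj (hsub n hn) hncc
              omega
            exact Nat.pow_le_pow_right (by omega) hmu
          have hsum := List.sum_le_card_nsmul _ _ hbound
          have hcard : ((((nbrs.filter (fun n => !chain.contains n)).map
                (fun n => (n, chain ++ [n]))).reverse).map
                  (fun e => ((pvAllVals adj).length + 2) ^ (pvMu adj e.2 + 1))).length
              ≤ (pvAllVals adj).length := by
            simp only [List.length_map, List.length_reverse]
            exact le_trans (List.length_filter_le _ _) hlen
          calc pvW adj _ ≤ _ := hsum
            _ ≤ (pvAllVals adj).length * ((pvAllVals adj).length + 2) ^ (pvMu adj chain) := by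
              simp only [smul_eq_mul]
              exact Nat.mul_le_mul_right _ hcard
        have hW' : pvW adj ((((nbrs.filter (fun n => !chain.contains n)).map
              (fun n => (n, chain ++ [n]))).reverse) ++ rest) ≤ f := by
          have happ : pvW adj ((((nbrs.filter (fun n => !chain.contains n)).map
                (fun n => (n, chain ++ [n]))).reverse) ++ rest)
              = pvW adj (((nbrs.filter (fun n => !chain.contains n)).map
                (fun n => (n, chain ++ [n]))).reverse) + pvW adj rest := by
            simp [pvW]
          have hpow : ((pvAllVals adj).length + 2) ^ (pvMu adj chain + 1)
              = ((pvAllVals adj).length + 2) * ((pvAllVals adj).length + 2) ^ (pvMu adj chain) := by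
            rw [pow_succ]; ring
          have hmul : ((pvAllVals adj).length + 2) * ((pvAllVals adj).length + 2) ^ (pvMu adj chain)
              = (pvAllVals adj).length * ((pvAllVals adj).length + 2) ^ (pvMu adj chain)
                + 2 * ((pvAllVals adj).length + 2) ^ (pvMu adj chain) := by ring
          omega
        have hih := ih ((((nbrs.filter (fun n => !chain.contains n)).map
              (fun n => (n, chain ++ [n]))).reverse) ++ rest) 
        have hdfs : pvDfs adj node chain =
            (let base : List (List String) × List (List String) :=
              if 2 < chain.length then ([chain], [])
              else if chain.length == 2 then ([], [chain]) else ([], [])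
            let r := pvProc adj (((nbrs.filter (fun n => !chain.contains n)).map
                       (fun n => (n, chain ++ [n]))).reverse)
            (base.1 ++ r.1, base.2 ++ r.2)) := by
          rw [pvDfs_eq]
          simp only [hgetD, List.filter_reverse, List.map_reverse]
        by_cases h3 : 2 < chain.length
        · rw [show pvLoopA adj (f + 1) ((node, chain) :: rest) chains singles
              = pvLoopA adj f ((((nbrs.filter (fun n => !chain.contains n)).map
                  (fun n => (n, chain ++ [n]))).reverse) ++ rest) (chains ++ [chain]) singles by
            simp [pvLoopA, hget, h3]]
          rw [hih _ _ hW']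
          simp [pvProc, hdfs, pvProc_append, h3, List.append_assoc]
        · by_cases h2 : chain.length = 2
          · rw [show pvLoopA adj (f + 1) ((node, chain) :: rest) chains singles
                = pvLoopA adj f ((((nbrs.filter (fun n => !chain.contains n)).map
                    (fun n => (n, chain ++ [n]))).reverse) ++ rest) chains (singles ++ [chain]) by
              simp [pvLoopA, hget, h2]]
            rw [hih _ _ hW']
            simp [pvProc, hdfs, pvProc_append, h2, List.append_assoc]
          · rw [show pvLoopA adj (f + 1) ((node, chain) :: rest) chains singles
                = pvLoopA adj f ((((nbrs.filter (fun n => !chain.contains n)).map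
                    (fun n => (n, chain ++ [n]))).reverse) ++ rest) chains singles by
              simp [pvLoopA, hget, h3, h2]]
            rw [hih _ _ hW']
            simp [pvProc, hdfs, pvProc_append, h3, h2]

-- the two adjacency-building loop bodies agree (A: if-not-in + append; B: setdefault + append)
theorem pvStep_eq :
    (fun (d : PySem.Dict String (List String)) (p : Option String × Option String) =>
      let t := pvNorm p.1
      let h := pvNorm p.2
      let d' := if d.contains t then d else d.insert t []
      d'.modify t [] (fun l => l ++ [h]))
    = (fun (d : PySem.Dict String (List String)) (p : Option String × Option String) =>
      let t := pvNorm p.1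
      let h := pvNorm p.2
      (d.setdefault t []).modify t [] (fun l => l ++ [h])) := by
  funext d p
  by_cases hc : d.contains (pvNorm p.1) = true
  · simp [hc, PySem.Dict.setdefault_of_contains]
  · simp [hc, PySem.Dict.setdefault_of_not_contains]

-- Python's set(c).issubset(set(o)) is "every element of c is in o"
theorem pvSubset_eq (c o : List String) :
    PySem.Set.issubset (PySem.Set.ofList c) (PySem.Set.ofList o)
      = c.all (fun x => o.contains x) := by
  have h1 : PySem.Set.issubset (PySem.Set.ofList c) (PySem.Set.ofList o) = true
      ↔ c.all (fun x => o.contains x) = true := by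
    simp [PySem.Set.issubset_iff, PySem.Set.mem_ofList, List.all_eq_true]
  cases hv : PySem.Set.issubset (PySem.Set.ofList c) (PySem.Set.ofList o) <;>
      rw [hv] at h1
  · cases ha : c.all (fun x => o.contains x)
    · rfl
    · exact absurd (h1.mpr ha) (by simp)
  · exact (h1.mp rfl).symm

-- ===== VERDICT (by name: the statement is the Claim_ definition above) =====
theorem find_chains_with_filter_spec : Claim_equal_find_chains_with_filter := by
  intro relations _
  unfold Spec_find_chains_with_filter
  simp only [find_chains_with_filter, find_chains_with_filter_alt]
  rw [pvStep_eq]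
  set adj := List.foldl _ PySem.Dict.empty relations with hadj
  have hf : (fun (acc : List (List String) × List (List String)) (k : String) =>
        pvLoopA adj (pvW adj [(k, [k])]) [(k, [k])] acc.1 acc.2)
      = fun acc k => (acc.1 ++ (pvDfs adj k [k]).1, acc.2 ++ (pvDfs adj k [k]).2) := by
    funext acc k
    rw [pvLoopA_eq adj (pvW adj [(k, [k])]) [(k, [k])] acc.1 acc.2 (le_refl _)]
    simp [pvProc]
  rw [hf]
  simp only [Prod.mk.injEq]
  refine ⟨?_, trivial⟩
  rw [PySem.List.foldl_append_if_eq_filter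
        (p := fun chain => (!(PySem.List.sorted
            (List.foldl (fun acc k => (acc.1 ++ (pvDfs adj k [k]).1, acc.2 ++ (pvDfs adj k [k]).2))
              ([], []) adj.keys).1 (fun c => (c.length : Int)) true).any
            (fun other => (PySem.Set.ofList chain).issubset (PySem.Set.ofList other)
              && chain != other)) && decide (2 < chain.length))]
  rw [List.nil_append]
  apply List.filter_congr
  intro c _
  simp only [pvSubset_eq]
  rw [Bool.and_comm]
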